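-- pv_equiv track=rewrite | github.com/ValGherdol/4-MAT_project | ClusterPath_functions.py | regroupPaths
-- ===== SOURCE A (Python) =====
-- def regroupPaths(LD_genePerPath , globalGenePool):
--
--     """
--     Associates to each gene a list of cluster path. Each path comes from a different dataset.
--
--     input1 : A list of dictionaries with tuples of Integers as keys and lists of gene names as values.
--     input2 : A list of gene names.
--
--     output1 : A dictionary with gene names as keys and lists of tuples of Integers as values.
--     """
--
--     D_allPathsPerGene = {}
--     for gene in globalGenePool : # For each gene
--         D_allPathsPerGene[gene] = []
--         for dico in LD_genePerPath : # For each dictionary of "path - gene list"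
--             for path,gene_list in dico.items():
--                 if gene in gene_list :
--                     D_allPathsPerGene[gene].append(path) # Recovering the path followed by the current gene
--                     break
--
--     return D_allPathsPerGene
-- ===== SOURCE B (Python) =====
-- def regroupPaths(LD_genePerPath, globalGenePool):
--     # Build, once per dataset, an inverted index gene -> first path containing it,
--     # then answer every gene by O(1) lookups.
--     indexes = []
--     for dico in LD_genePerPath:
--         idx = {}
--         for path, gene_list in dico.items():
--             for g in gene_list:
--                 if g not in idx:
--                     idx[g] = path
--         indexes.append(idx)
--     return {g: [idx[g] for idx in indexes if g in idx] for g in globalGenePool}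
-- ===== Notes on version B (the rewrite author's own statement) =====
-- stated objective: faster
-- what changed: B precomputes per-dataset inverted indexes (gene -> first path containing it) once, then builds the result by hash lookups, instead of scanning every path's gene list for every gene.
import Mathlib
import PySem

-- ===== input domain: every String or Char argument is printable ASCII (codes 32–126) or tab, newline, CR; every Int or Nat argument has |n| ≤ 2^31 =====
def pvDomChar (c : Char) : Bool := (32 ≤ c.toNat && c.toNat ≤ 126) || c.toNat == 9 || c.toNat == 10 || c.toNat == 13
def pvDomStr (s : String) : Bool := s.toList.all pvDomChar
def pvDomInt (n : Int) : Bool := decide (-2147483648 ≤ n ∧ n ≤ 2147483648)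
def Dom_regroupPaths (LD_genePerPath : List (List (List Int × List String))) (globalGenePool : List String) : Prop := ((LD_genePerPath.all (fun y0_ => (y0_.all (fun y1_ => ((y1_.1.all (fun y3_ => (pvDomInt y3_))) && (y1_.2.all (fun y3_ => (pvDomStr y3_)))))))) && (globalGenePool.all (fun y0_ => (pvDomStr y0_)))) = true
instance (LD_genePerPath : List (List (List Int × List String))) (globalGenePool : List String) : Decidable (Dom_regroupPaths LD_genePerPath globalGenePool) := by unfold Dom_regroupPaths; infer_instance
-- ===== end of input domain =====

-- B replaces the per-gene scan of every path's gene list by per-dataset inverted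
-- indexes built once (objective: faster, asymptotic).

-- ===== PORT A =====
-- for gene in pool: d[gene] = []; for dico: for path, gl in dico.items(): if gene in gl: append; break
def regroupPaths (LD_genePerPath : List (List (List Int × List String))) (globalGenePool : List String) : List (String × List (List Int)) :=
  (globalGenePool.foldl (fun d gene =>
    LD_genePerPath.foldl (fun d dico =>
      match dico.find? (fun pg => pg.2.contains gene) with
      | some pg => d.modify gene [] (fun l => l ++ [pg.1])
      | none => d)
      (d.insert gene []))
    PySem.Dict.empty).items

-- ===== PORT B =====
-- idx = {}; for path, gl in dico.items(): for g in gl: if g not in idx: idx[g] = path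
def pvBuildIdx (dico : List (List Int × List String)) : PySem.Dict String (List Int) :=
  dico.foldl (fun idx pg =>
    pg.2.foldl (fun idx g => if idx.contains g then idx else idx.insert g pg.1) idx)
    PySem.Dict.empty

-- {g: [idx[g] for idx in indexes if g in idx] for g in pool}
def regroupPaths_alt (LD_genePerPath : List (List (List Int × List String))) (globalGenePool : List String) : List (String × List (List Int)) :=
  let indexes := LD_genePerPath.map pvBuildIdx
  (globalGenePool.foldl (fun d g =>
    d.insert g (indexes.filterMap (fun idx => idx.get? g)))
    PySem.Dict.empty).items

-- ===== PRECONDITION & SPEC =====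
def Spec_regroupPaths (LD_genePerPath : List (List (List Int × List String))) (globalGenePool : List String) (out : List (String × List (List Int))) : Prop := out = regroupPaths_alt LD_genePerPath globalGenePool
instance (LD_genePerPath : List (List (List Int × List String))) (globalGenePool : List String) (out : List (String × List (List Int))) : Decidable (Spec_regroupPaths LD_genePerPath globalGenePool out) := by unfold Spec_regroupPaths; infer_instance

-- ===== CLAIM (what is proved, stated in full; the proofs are below) =====
def Claim_equal_regroupPaths : Prop := ∀ (LD_genePerPath : List (List (List Int × List String))) (globalGenePool : List String), Dom_regroupPaths LD_genePerPath globalGenePool → Spec_regroupPaths LD_genePerPath globalGenePool (regroupPaths LD_genePerPath globalGenePool)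

-- ===== LEMMAS AND PROOFS =====

-- after the inner gene-list loop, idx.get? g is the old value, or else the path if g occurs
theorem idx_inner (gl : List String) (p : List Int) (idx : PySem.Dict String (List Int)) (g : String) :
    (gl.foldl (fun idx x => if idx.contains x then idx else idx.insert x p) idx).get? g =
      ((idx.get? g).or (if gl.contains g then some p else none)) := by
  induction gl generalizing idx with
  | nil => cases h : idx.get? g <;> simp [h]
  | cons x xs ih =>
    simp only [List.foldl_cons]
    by_cases hc : idx.contains x
    · rw [if_pos hc, ih]
      by_cases hg : g = x
      · subst hg
        rw [PySem.Dict.contains_eq_isSome_get?] at hc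
        cases h : idx.get? g
        · simp [h] at hc
        · simp [h]
      · simp [hg]
    · rw [if_neg hc, ih, PySem.Dict.get?_insert]
      by_cases hg : g = x
      · subst hg
        rw [PySem.Dict.contains_eq_isSome_get?] at hc
        cases h : idx.get? g
        · simp [List.contains_cons]
        · simp [h] at hc
      · simp [List.contains_cons, hg]

-- the inverted index answers exactly A's first-match scan
theorem idx_get (dico : List (List Int × List String)) (g : String) :
    (pvBuildIdx dico).get? g = (dico.find? (fun pg => pg.2.contains g)).map Prod.fst := by
  unfold pvBuildIdx
  suffices h : ∀ idx : PySem.Dict String (List Int),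
      (dico.foldl (fun idx pg =>
        pg.2.foldl (fun idx g => if idx.contains g then idx else idx.insert g pg.1) idx) idx).get? g
      = (idx.get? g).or ((dico.find? (fun pg => pg.2.contains g)).map Prod.fst) by
    rw [h]; simp
  induction dico with
  | nil => intro idx; cases h : idx.get? g <;> simp [h]
  | cons pg rest ih =>
    intro idx
    simp only [List.foldl_cons, ih, idx_inner, Option.or_assoc]
    by_cases hm : g ∈ pg.2 <;>
      cases h : idx.get? g <;>
        simp [hm]

-- A's per-gene loop over the datasets just builds the list of first matches
theorem a_gene_loop (LD : List (List (List Int × List String))) (gene : String)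
    (d : PySem.Dict String (List (List Int))) (acc : List (List Int)) :
    LD.foldl (fun d dico =>
      match dico.find? (fun pg => pg.2.contains gene) with
      | some pg => d.modify gene [] (fun l => l ++ [pg.1])
      | none => d) (d.insert gene acc)
    = d.insert gene (acc ++ LD.filterMap (fun dico => (dico.find? (fun pg => pg.2.contains gene)).map Prod.fst)) := by
  induction LD generalizing acc with
  | nil => simp
  | cons dico rest ih =>
    rw [List.foldl_cons, List.filterMap_cons]
    cases h : dico.find? (fun pg => pg.2.contains gene) with
    | none => exact ih acc
    | some pg =>
      have hstep : ((d.insert gene acc).modify gene [] (fun l => l ++ [pg.1]))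
          = d.insert gene (acc ++ [pg.1]) := by
        simp [PySem.Dict.modify, PySem.Dict.getD_insert_self, PySem.Dict.insert_insert_self]
      show List.foldl _ ((d.insert gene acc).modify gene [] (fun l => l ++ [pg.1])) rest = _
      rw [hstep, ih]
      simp

-- ===== VERDICT (by name: the statement is the Claim_ definition above) =====

theorem regroupPaths_spec : Claim_equal_regroupPaths := by
  intro LD pool _
  unfold Spec_regroupPaths regroupPaths regroupPaths_alt
  congr 1
  apply PySem.List.foldl_congr_mem
  intro d g _
  rw [a_gene_loop LD g d []]
  simp only [List.nil_append, List.filterMap_map, Function.comp_def]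
  congr 1
  apply List.filterMap_congr
  intro dico _
  rw [idx_get]
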